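-- pv_equiv track=rewrite | github.com/SreevaniPedaballi/DSA | Bitwise Operators/Magic_Number.py | magic_number
-- ===== SOURCE A (Python) =====
-- def magic_number(n):
--     base=5
--     ans=0
--     while n >0:
--         last=n&1 # to get last bit of teh number
--         n=n >> 1
--         ans += last * base
--         base =base *5
--     return ans
-- ===== SOURCE B (Python) =====
-- def magic_number(n):
--     # MSB-first Horner evaluation of n's binary digits in base 5 (times 5).
--     if n <= 0:
--         return 0
--     ans = 0
--     for i in range(n.bit_length() - 1, -1, -1):
--         ans = ans * 5 + ((n >> i) & 1)
--     return 5 * ans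
-- ===== Notes on version B (the rewrite author's own statement) =====
-- stated objective: alternative
-- what changed: Replaces A's LSB-first loop that destructively halves n while maintaining a growing power-of-5 weight with an MSB-first Horner evaluation over the bit indices from bit_length()-1 down to 0, keeping n intact and no power accumulator.
import Mathlib
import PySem

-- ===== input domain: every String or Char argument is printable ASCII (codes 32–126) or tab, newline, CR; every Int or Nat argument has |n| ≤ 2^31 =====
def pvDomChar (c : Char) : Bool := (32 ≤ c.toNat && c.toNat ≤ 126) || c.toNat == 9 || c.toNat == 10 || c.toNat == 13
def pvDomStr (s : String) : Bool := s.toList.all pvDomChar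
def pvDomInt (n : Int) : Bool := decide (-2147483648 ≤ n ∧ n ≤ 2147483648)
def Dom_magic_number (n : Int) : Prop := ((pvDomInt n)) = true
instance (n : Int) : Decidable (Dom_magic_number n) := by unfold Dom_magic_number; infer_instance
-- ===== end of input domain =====

-- B replaces A's LSB-first halving loop (growing power-of-5 weight) with an MSB-first
-- Horner evaluation over bit indices bit_length()-1 .. 0; same cost, different traversal.


-- ===== PORT A =====
-- the 'while n > 0' loop of A, state (n, base, ans)
def magicLoop (n base ans : Int) : Int :=
  if _h : 0 < n then
    magicLoop (n >>> (1 : Nat)) (base * 5) (ans + PySem.Int.band n 1 * base)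
  else ans
termination_by n.toNat
decreasing_by rw [Int.shiftRight_eq_div_pow]; omega

def magic_number (n : Int) : Int := magicLoop n 5 0

-- ===== PORT B =====
def magic_number_alt (n : Int) : Int :=
  if n ≤ 0 then 0
  else
    5 * (PySem.List.pyRange ((PySem.Int.bitLength n : Int) - 1) (-1) (-1)).foldl
          (fun ans i => ans * 5 + PySem.Int.band (n >>> i.toNat) 1) 0

-- ===== PRECONDITION & SPEC =====
def Spec_magic_number (n : Int) (out : Int) : Prop := out = magic_number_alt n
instance (n : Int) (out : Int) : Decidable (Spec_magic_number n out) := by unfold Spec_magic_number; infer_instance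

-- ===== CLAIM (what is proved, stated in full; the proofs are below) =====
def Claim_equal_magic_number : Prop := ∀ (n : Int), Dom_magic_number n → Spec_magic_number n (magic_number n)

-- ===== LEMMAS AND PROOFS =====

-- [k-1, k-2, …, 0] : the descending index list B iterates over
def pvDesc (k : Nat) : List Int := (List.range k).reverse.map (fun j => Int.ofNat j)

lemma pvDesc_succ (k : Nat) : pvDesc (k + 1) = (Int.ofNat k) :: pvDesc k := by
  simp [pvDesc, List.range_succ]

lemma pvHorner (n : Int) (k : Nat) (ans : Int) :
    (pvDesc k).foldl (fun a i => a * 5 + PySem.Int.band (n >>> i.toNat) 1) ans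
      = ans * 5 ^ k + ∑ i ∈ Finset.range k, PySem.Int.band (n >>> i) 1 * 5 ^ i := by
  induction k generalizing ans with
  | zero => simp [pvDesc]
  | succ k ih =>
      rw [pvDesc_succ, List.foldl_cons, ih, Finset.sum_range_succ]
      simp only [show ((Int.ofNat k).toNat : Int) = (k : Int) from rfl,
        Int.shiftRight_natCast_right]
      push_cast
      ring

lemma pvRange_eq_desc (L : Nat) (h : 0 < L) :
    PySem.List.pyRange ((L : Int) - 1) (-1) (-1) = pvDesc L := by
  have h1 : PySem.List.pyRange ((L : Int) - 1) (-1) (-1)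
      = List.map (fun k : Nat => ((L : Int) - 1) + (-1) * k) (List.range L) := by
    rw [PySem.List.pyRange]
    rw [if_neg (by norm_num)]
    rw [if_neg (by norm_num)]
    rw [if_pos (by omega : (-1 : Int) < (L : Int) - 1)]
    norm_num
  rw [h1, pvDesc]
  apply List.ext_getElem
  · simp
  · intro j hj hj'
    simp only [List.length_map, List.length_range] at hj
    simp only [List.getElem_map, List.getElem_reverse, List.getElem_range, List.length_range]
    simp only [Int.ofNat_eq_natCast]
    omega

lemma pvShift1 (n : Int) : n >>> (1 : Nat) = PySem.Int.floordiv n 2 := by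
  rw [Int.shiftRight_eq_div_pow]
  norm_num [PySem.Int.floordiv, Int.ediv_eq_fdiv]

lemma pvLoop : ∀ (m : Nat) (n : Int), 0 ≤ n → n.toNat = m → ∀ base ans,
    magicLoop n base ans
      = ans + base * ∑ i ∈ Finset.range (PySem.Int.bitLength n),
          PySem.Int.band (n >>> i) 1 * 5 ^ i := by
  intro m
  induction m using Nat.strong_induction_on with
  | _ m ih =>
    intro n hn hm base ans
    by_cases h : 0 < n
    · rw [magicLoop.eq_def, dif_pos h]
      have hlt : (n >>> (1 : Nat)).toNat < m := by
        rw [Int.shiftRight_eq_div_pow]; omega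
      have hge : 0 ≤ n >>> (1 : Nat) := by
        rw [Int.shiftRight_eq_div_pow]; omega
      rw [ih _ hlt _ hge rfl]
      have hL : PySem.Int.bitLength n = PySem.Int.bitLength (n >>> (1 : Nat)) + 1 := by
        rw [pvShift1]; exact PySem.Int.bitLength_of_pos h
      rw [hL, Finset.sum_range_succ']
      have hsum : ∀ i : Nat, PySem.Int.band (n >>> (i + 1)) 1 * 5 ^ (i + 1)
          = 5 * (PySem.Int.band ((n >>> (1 : Nat)) >>> i) 1 * 5 ^ i) := by
        intro i
        have harg : n >>> (i + 1) = (n >>> (1 : Nat)) >>> i := by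
          rw [← Int.shiftRight_add, Nat.add_comm 1 i]
        rw [harg, pow_succ]
        ring
      rw [Finset.sum_congr rfl (fun i _ => hsum i), ← Finset.mul_sum]
      have h0 : n >>> (0 : Nat) = n := by rw [Int.shiftRight_eq_div_pow]; simp
      rw [h0]
      ring
    · have hz : n = 0 := by omega
      subst hz
      rw [magicLoop.eq_def]
      simp

-- ===== VERDICT (by name: the statement is the Claim_ definition above) =====
theorem magic_number_spec : Claim_equal_magic_number := by
  intro n _
  show magic_number n = magic_number_alt n
  by_cases hn : n ≤ 0
  · rw [magic_number, magicLoop.eq_def, dif_neg (by omega), magic_number_alt, if_pos hn]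
  · have hpos : 0 < n := by omega
    have hLpos : 0 < PySem.Int.bitLength n := by
      rw [PySem.Int.bitLength_of_pos hpos]; omega
    rw [magic_number, magic_number_alt, if_neg hn,
        pvRange_eq_desc _ hLpos, pvHorner,
        pvLoop n.toNat n (by omega) rfl]
    ring
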